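-- pv_equiv track=rewrite | github.com/chris-warren/CSC-502-PSCAN | similarity_score/similarity.py | get_unique_undirected_edges
-- ===== SOURCE A (Python) =====
-- from typing import Dict, Iterable, List, Set, Tuple
--
-- def get_unique_undirected_edges(adjacency: Dict[int, Set[int]]) -> List[Tuple[int, int]]:
--     """
--     Extract all unique undirected edges from the adjacency structure.
--
--     An undirected edge is stored once in canonical form:
--         (min(u, v), max(u, v))
--
--     Parameters
--     ----------
--     adjacency : Dict[int, Set[int]]
--         Node -> neighbor set mapping.
--
--     Returns
--     -------
--     List[Tuple[int, int]]
--         Sorted list of unique undirected edges.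
--     """
--     edges: Set[Tuple[int, int]] = set()
--
--     for u, neighbors in adjacency.items():
--         for v in neighbors:
--             if u == v:
--                 continue
--             edge = (u, v) if u < v else (v, u)
--             edges.add(edge)
--
--     return sorted(edges)
-- ===== SOURCE B (Python) =====
-- from typing import Dict, List, Set, Tuple
--
--
-- def get_unique_undirected_edges(adjacency: Dict[int, Set[int]]) -> List[Tuple[int, int]]:
--     raw: List[Tuple[int, int]] = []
--     for u, neighbors in adjacency.items():
--         for v in neighbors:
--             if u != v:
--                 raw.append((u, v) if u < v else (v, u))
--     raw.sort()
--     out: List[Tuple[int, int]] = []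
--     for e in raw:
--         if not out or e != out[-1]:
--             out.append(e)
--     return out
-- ===== Notes on version B (the rewrite author's own statement) =====
-- stated objective: alternative
-- what changed: B collects every canonical edge into a plain list (duplicates included), sorts it, and deduplicates by a single adjacent-compare scan over the sorted list, instead of A's hash-set deduplication followed by sorting the set.
import Mathlib
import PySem

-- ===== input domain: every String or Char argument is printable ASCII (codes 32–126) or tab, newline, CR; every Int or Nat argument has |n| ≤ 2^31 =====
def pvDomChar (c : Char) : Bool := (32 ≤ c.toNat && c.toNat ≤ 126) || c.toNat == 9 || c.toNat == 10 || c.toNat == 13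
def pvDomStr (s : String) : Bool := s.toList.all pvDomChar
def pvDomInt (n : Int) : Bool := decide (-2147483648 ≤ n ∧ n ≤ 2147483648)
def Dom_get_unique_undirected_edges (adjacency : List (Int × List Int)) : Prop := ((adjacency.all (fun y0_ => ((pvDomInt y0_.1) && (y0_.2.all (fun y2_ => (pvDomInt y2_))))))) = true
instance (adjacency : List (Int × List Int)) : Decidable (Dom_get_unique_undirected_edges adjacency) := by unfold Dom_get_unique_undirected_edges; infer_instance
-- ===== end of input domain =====

-- B replaces A's hash-set deduplication by sort-then-adjacent-scan deduplication of the full edge list (alternative algorithm, same result).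


-- ===== PORT A =====
-- builds a set of canonical edges, then returns sorted(edges) (Python tuple sort = lexicographic)
def get_unique_undirected_edges (adjacency : List (Int × List Int)) : List (Int × Int) :=
  let edges : PySem.Set (Int × Int) :=
    adjacency.foldl (fun edges p =>
      p.2.foldl (fun edges v =>
        if p.1 == v then edges
        else PySem.Set.add edges (if p.1 < v then (p.1, v) else (v, p.1))) edges)
      PySem.Set.empty
  PySem.List.sorted2 edges (·.1) (·.2)

-- ===== PORT B =====
-- collects every canonical edge (duplicates kept), sorts, then one adjacent-compare dedup scan
-- (the 'not out or e != out[-1]' test: out[-1] is PySem.List.pyGet? out (-1); Python's 'or' short-circuits,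
--  the disjunction is only inspected when the first disjunct already decides it, so this is exact)
def get_unique_undirected_edges_alt (adjacency : List (Int × List Int)) : List (Int × Int) :=
  let raw : List (Int × Int) :=
    adjacency.foldl (fun raw p =>
      p.2.foldl (fun raw v =>
        if p.1 != v then raw ++ [if p.1 < v then (p.1, v) else (v, p.1)]
        else raw) raw)
      []
  (PySem.List.sorted2 raw (·.1) (·.2)).foldl
    (fun out e => if out = [] ∨ ¬ (PySem.List.pyGet? out (-1) = some e) then out ++ [e] else out) []

-- ===== PRECONDITION & SPEC =====
def Spec_get_unique_undirected_edges (adjacency : List (Int × List Int)) (out : List (Int × Int)) : Prop := out = get_unique_undirected_edges_alt adjacency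
instance (adjacency : List (Int × List Int)) (out : List (Int × Int)) : Decidable (Spec_get_unique_undirected_edges adjacency out) := by unfold Spec_get_unique_undirected_edges; infer_instance

-- ===== CLAIM (what is proved, stated in full; the proofs are below) =====
def Claim_equal_get_unique_undirected_edges : Prop := ∀ (adjacency : List (Int × List Int)), Dom_get_unique_undirected_edges adjacency → Spec_get_unique_undirected_edges adjacency (get_unique_undirected_edges adjacency)

-- ===== LEMMAS AND PROOFS =====

-- Python's lexicographic order on int pairs, as used by sorted() on tuples
def pvLexLT (a b : Int × Int) : Prop := a.1 < b.1 ∨ (a.1 = b.1 ∧ a.2 < b.2)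
def pvLexLE (a b : Int × Int) : Prop := pvLexLT a b ∨ a = b
-- the Bool comparison sorted2 uses
def pvLtb (a b : Int × Int) : Bool := decide (a.1 < b.1) || (!decide (b.1 < a.1) && decide (a.2 < b.2))

theorem pvLtb_iff (a b : Int × Int) : pvLtb a b = true ↔ pvLexLT a b := by
  rcases a with ⟨a1, a2⟩; rcases b with ⟨b1, b2⟩
  simp [pvLtb, pvLexLT]; omega

theorem pvLexLT_asymm {a b : Int × Int} : pvLexLT a b → pvLexLT b a → False := by
  rcases a with ⟨a1, a2⟩; rcases b with ⟨b1, b2⟩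
  simp [pvLexLT]; omega

theorem pvLexLT_irrefl {a : Int × Int} : ¬ pvLexLT a a := by
  rcases a with ⟨a1, a2⟩; simp [pvLexLT]

theorem pvLexLE_of_not_lt {a b : Int × Int} (h : ¬ pvLexLT a b) : pvLexLE b a := by
  rcases a with ⟨a1, a2⟩; rcases b with ⟨b1, b2⟩
  simp [pvLexLT, pvLexLE, Prod.ext_iff] at *; omega

theorem pvLexLT_trans {a b c : Int × Int} : pvLexLT a b → pvLexLT b c → pvLexLT a c := by
  rcases a with ⟨a1, a2⟩; rcases b with ⟨b1, b2⟩; rcases c with ⟨c1, c2⟩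
  simp [pvLexLT]; omega

theorem pvLexLT_of_lt_of_le {a b c : Int × Int} (h1 : pvLexLT a b) (h2 : pvLexLE b c) : pvLexLT a c := by
  rcases h2 with h2 | rfl
  · exact pvLexLT_trans h1 h2
  · exact h1

theorem pvLexLT_of_le_of_lt {a b c : Int × Int} (h1 : pvLexLE a b) (h2 : pvLexLT b c) : pvLexLT a c := by
  rcases h1 with h1 | rfl
  · exact pvLexLT_trans h1 h2
  · exact h2

theorem pvLexLE_trans {a b c : Int × Int} (h1 : pvLexLE a b) (h2 : pvLexLE b c) : pvLexLE a c := by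
  rcases h1 with h1 | rfl
  · exact Or.inl (pvLexLT_of_lt_of_le h1 h2)
  · exact h2

theorem pvLexLT_of_le_of_ne {a b : Int × Int} (h1 : pvLexLE a b) (h2 : a ≠ b) : pvLexLT a b := by
  rcases h1 with h1 | rfl
  · exact h1
  · exact absurd rfl h2

-- insertBy with pvLtb keeps a pvLexLE-sorted list sorted
theorem pairwise_insertBy_pvLtb (x : Int × Int) (ys : List (Int × Int))
    (h : ys.Pairwise pvLexLE) : (PySem.List.insertBy pvLtb x ys).Pairwise pvLexLE := by
  induction ys with
  | nil => simp [PySem.List.insertBy]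
  | cons y t ih =>
    rcases h with - | ⟨hy, ht⟩
    by_cases hxy : pvLtb x y = true
    · simp only [PySem.List.insertBy, hxy, if_pos]
      refine List.Pairwise.cons ?_ (List.Pairwise.cons hy ht)
      intro z hz
      rcases List.mem_cons.mp hz with rfl | hz
      · exact Or.inl ((pvLtb_iff x z).mp hxy)
      · exact pvLexLE_trans (Or.inl ((pvLtb_iff x y).mp hxy)) (hy z hz)
    · simp only [PySem.List.insertBy, hxy, if_neg, Bool.not_eq_true]
      refine List.Pairwise.cons ?_ (ih ht)
      intro z hz
      rcases (PySem.List.mem_insertBy pvLtb x z t).mp hz with rfl | hz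
      · exact pvLexLE_of_not_lt (fun hc => hxy ((pvLtb_iff z y).mpr hc))
      · exact hy z hz

theorem pairwise_foldl_insertBy_pvLtb (xs : List (Int × Int)) :
    ∀ acc : List (Int × Int), acc.Pairwise pvLexLE →
      (xs.foldl (fun acc x => PySem.List.insertBy pvLtb x acc) acc).Pairwise pvLexLE := by
  induction xs with
  | nil => intro acc h; simpa using h
  | cons x t ih =>
    intro acc h
    exact ih _ (pairwise_insertBy_pvLtb x acc h)

theorem sorted2_eq_foldl (xs : List (Int × Int)) :
    PySem.List.sorted2 xs (·.1) (·.2) = xs.foldl (fun acc x => PySem.List.insertBy pvLtb x acc) [] := rfl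

theorem sorted2_pairwise_pvLexLE (xs : List (Int × Int)) :
    (PySem.List.sorted2 xs (·.1) (·.2)).Pairwise pvLexLE := by
  rw [sorted2_eq_foldl]
  exact pairwise_foldl_insertBy_pvLtb xs [] (List.Pairwise.nil)

-- out[-1] of a nonempty list is its last element
theorem pyGet?_neg_one (l : List (Int × Int)) : PySem.List.pyGet? l (-1) = l.getLast? := by
  cases l with
  | nil => rfl
  | cons a t =>
    simp [PySem.List.pyGet?, PySem.List.pyIdx?, List.getLast?_eq_getElem?]

-- in a strictly sorted list every element is ≤ the last one
theorem le_last_of_pairwiseLT : ∀ (acc : List (Int × Int)) (l : Int × Int),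
    acc.getLast? = some l → acc.Pairwise pvLexLT → ∀ a ∈ acc, pvLexLE a l := by
  intro acc
  induction acc with
  | nil => intro l h; simp at h
  | cons x t ih =>
    intro l hl hp a ha
    cases t with
    | nil =>
      simp at hl ha
      rw [ha, ← hl]; exact Or.inr rfl
    | cons y t' =>
      rw [List.getLast?_cons_cons] at hl
      rcases List.mem_cons.mp ha with rfl | ha'
      · have hyl := ih l hl hp.tail y List.mem_cons_self
        exact Or.inl (pvLexLT_of_lt_of_le (List.rel_of_pairwise_cons hp List.mem_cons_self) hyl)
      · exact ih l hl hp.tail a ha'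

-- the dedup scan: starting from a strictly sorted accumulator whose last element precedes
-- every remaining element, it stays strictly sorted and collects exactly the members
theorem dedup_fold_spec : ∀ (es acc : List (Int × Int)),
    acc.Pairwise pvLexLT → es.Pairwise pvLexLE →
    (∀ l, acc.getLast? = some l → ∀ e ∈ es, pvLexLE l e) →
    (es.foldl (fun out e =>
        if out = [] ∨ ¬ (PySem.List.pyGet? out (-1) = some e) then out ++ [e] else out) acc).Pairwise pvLexLT
    ∧ ∀ x, (x ∈ es.foldl (fun out e =>
        if out = [] ∨ ¬ (PySem.List.pyGet? out (-1) = some e) then out ++ [e] else out) acc ↔ x ∈ acc ∨ x ∈ es) := by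
  intro es
  induction es with
  | nil => intro acc h1 _ _; exact ⟨h1, by simp⟩
  | cons e rest ih =>
    intro acc h1 h2 h3
    simp only [List.foldl_cons]
    by_cases hc : acc = [] ∨ ¬ (PySem.List.pyGet? acc (-1) = some e)
    · rw [if_pos hc]
      have hlt : ∀ a ∈ acc, pvLexLT a e := by
        intro a ha
        cases hacc : acc.getLast? with
        | none => rw [List.getLast?_eq_none_iff] at hacc; subst hacc; simp at ha
        | some l =>
          have hne : l ≠ e := by
            rcases hc with hc | hc
            · subst hc; simp at hacc
            · rw [pyGet?_neg_one, hacc] at hc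
              exact fun h => hc (by rw [h])
          exact pvLexLT_of_le_of_lt (le_last_of_pairwiseLT acc l hacc h1 a ha)
            (pvLexLT_of_le_of_ne (h3 l hacc e List.mem_cons_self) hne)
      have h1' : (acc ++ [e]).Pairwise pvLexLT := by
        rw [List.pairwise_append]
        exact ⟨h1, List.pairwise_singleton _ _, fun a ha b hb => (List.mem_singleton.mp hb) ▸ hlt a ha⟩
      have h3' : ∀ l, (acc ++ [e]).getLast? = some l → ∀ e' ∈ rest, pvLexLE l e' := by
        intro l hl
        rw [List.getLast?_concat] at hl
        cases hl
        exact fun e' he' => List.rel_of_pairwise_cons h2 he'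
      obtain ⟨hp, hm⟩ := ih (acc ++ [e]) h1' h2.tail h3'
      refine ⟨hp, fun x => (hm x).trans ?_⟩
      simp [or_assoc]
    · rw [if_neg hc]
      rw [not_or, not_not] at hc
      obtain ⟨hnil, hlast⟩ := hc
      rw [pyGet?_neg_one] at hlast
      have h3' : ∀ l, acc.getLast? = some l → ∀ e' ∈ rest, pvLexLE l e' := by
        intro l hl
        rw [hlast] at hl
        cases hl
        exact fun e' he' => List.rel_of_pairwise_cons h2 he'
      obtain ⟨hp, hm⟩ := ih acc h1 h2.tail h3'
      have hemem : e ∈ acc := by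
        have : ∃ l', acc = l' ++ [e] := List.getLast?_eq_some_iff.mp hlast
        obtain ⟨l', rfl⟩ := this
        simp
      refine ⟨hp, fun x => (hm x).trans ?_⟩
      constructor
      · rintro (h | h)
        · exact Or.inl h
        · exact Or.inr (List.mem_cons_of_mem e h)
      · rintro (h | h)
        · exact Or.inl h
        · rcases List.mem_cons.mp h with rfl | h
          · exact Or.inl hemem
          · exact Or.inr h

-- two strictly lexicographically sorted lists with the same members are equal
theorem eq_of_pairwise_pvLexLT : ∀ (l1 l2 : List (Int × Int)),
    l1.Pairwise pvLexLT → l2.Pairwise pvLexLT → (∀ x, x ∈ l1 ↔ x ∈ l2) → l1 = l2 := by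
  intro l1
  induction l1 with
  | nil =>
    intro l2 _ _ hm
    cases l2 with
    | nil => rfl
    | cons b t2 => exact absurd ((hm b).mpr List.mem_cons_self) (by simp)
  | cons a t1 ih =>
    intro l2 h1 h2 hm
    cases l2 with
    | nil => exact absurd ((hm a).mp List.mem_cons_self) (by simp)
    | cons b t2 =>
      have hab : a = b := by
        by_contra hne
        have ha2 : a ∈ t2 := by
          rcases List.mem_cons.mp ((hm a).mp List.mem_cons_self) with h | h
          · exact absurd h hne
          · exact h
        have hb1 : b ∈ t1 := by
          rcases List.mem_cons.mp ((hm b).mpr List.mem_cons_self) with h | h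
          · exact absurd h.symm hne
          · exact h
        exact pvLexLT_asymm (List.rel_of_pairwise_cons h1 hb1) (List.rel_of_pairwise_cons h2 ha2)
      subst hab
      have htail : t1 = t2 := by
        refine ih t2 h1.tail h2.tail (fun x => ⟨fun hx => ?_, fun hx => ?_⟩)
        · rcases List.mem_cons.mp ((hm x).mp (List.mem_cons_of_mem a hx)) with h | h
          · exact absurd (h ▸ List.rel_of_pairwise_cons h1 hx) pvLexLT_irrefl
          · exact h
        · rcases List.mem_cons.mp ((hm x).mpr (List.mem_cons_of_mem a hx)) with h | h
          · exact absurd (h ▸ List.rel_of_pairwise_cons h2 hx) pvLexLT_irrefl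
          · exact h
      rw [htail]

-- the flat list of canonical edges (with duplicates), in traversal order
def pvCanon (u v : Int) : Int × Int := if u < v then (u, v) else (v, u)
def pvRawOf (adjacency : List (Int × List Int)) : List (Int × Int) :=
  adjacency.flatMap (fun p => (p.2.filter (fun v => !(p.1 == v))).map (pvCanon p.1))

-- B's accumulation loop produces exactly pvRawOf
theorem alt_raw_eq (adjacency : List (Int × List Int)) :
    adjacency.foldl (fun raw p =>
      p.2.foldl (fun raw v =>
        if p.1 != v then raw ++ [if p.1 < v then (p.1, v) else (v, p.1)]
        else raw) raw) [] = pvRawOf adjacency := by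
  have hrow : ∀ (p : Int × List Int) (acc : List (Int × Int)),
      p.2.foldl (fun raw v =>
        if p.1 != v then raw ++ [if p.1 < v then (p.1, v) else (v, p.1)]
        else raw) acc
      = acc ++ (p.2.filter (fun v => !(p.1 == v))).map (pvCanon p.1) := by
    intro p acc
    have := PySem.List.foldl_append_if (fun v => !(p.1 == v)) (pvCanon p.1) (l := p.2) (acc := acc)
    simpa [pvCanon, bne] using this
  rw [PySem.List.foldl_congr_mem adjacency _
      (fun raw p => raw ++ (p.2.filter (fun v => !(p.1 == v))).map (pvCanon p.1)) []
      (fun raw p _ => hrow p raw)]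
  simpa [pvRawOf] using
    PySem.List.foldl_append_eq_flatMap
      (fun p : Int × List Int => (p.2.filter (fun v => !(p.1 == v))).map (pvCanon p.1))
      (l := adjacency) (acc := [])

-- A's accumulation loop produces the Python set of pvRawOf
theorem a_set_eq (adjacency : List (Int × List Int)) :
    adjacency.foldl (fun edges p =>
      p.2.foldl (fun edges v =>
        if p.1 == v then edges
        else PySem.Set.add edges (if p.1 < v then (p.1, v) else (v, p.1))) edges)
      PySem.Set.empty = PySem.Set.ofList (pvRawOf adjacency) := by
  have hrow : ∀ (p : Int × List Int) (s : PySem.Set (Int × Int)),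
      p.2.foldl (fun edges v =>
        if p.1 == v then edges
        else PySem.Set.add edges (if p.1 < v then (p.1, v) else (v, p.1))) s
      = ((p.2.filter (fun v => !(p.1 == v))).map (pvCanon p.1)).foldl PySem.Set.add s := by
    intro p s
    have hfun : (fun (edges : PySem.Set (Int × Int)) v =>
        if p.1 == v then edges
        else PySem.Set.add edges (if p.1 < v then (p.1, v) else (v, p.1)))
        = (fun edges v => if !(p.1 == v) then PySem.Set.add edges (pvCanon p.1 v) else edges) := by
      funext edges v
      cases h : p.1 == v
      · simp [pvCanon]
      · simp
    rw [hfun, PySem.List.foldl_if_eq_foldl_filter, List.foldl_map]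
  have hmain : ∀ (rows : List (Int × List Int)) (s : PySem.Set (Int × Int)),
      rows.foldl (fun edges p =>
        p.2.foldl (fun edges v =>
          if p.1 == v then edges
          else PySem.Set.add edges (if p.1 < v then (p.1, v) else (v, p.1))) edges) s
      = (pvRawOf rows).foldl PySem.Set.add s := by
    intro rows
    induction rows with
    | nil => intro s; simp [pvRawOf]
    | cons p t ih =>
      intro s
      simp only [List.foldl_cons, pvRawOf, List.flatMap_cons, List.foldl_append]
      rw [hrow p s, ih]
      rfl
  rw [hmain, PySem.Set.ofList_eq_foldl]
  rfl

-- the heart: sorted-set = adjacent-dedup of sorted-with-duplicates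
theorem sorted_set_eq_dedup_sorted (L : List (Int × Int)) :
    PySem.List.sorted2 (PySem.Set.ofList L) (·.1) (·.2)
      = (PySem.List.sorted2 L (·.1) (·.2)).foldl
          (fun out e => if out = [] ∨ ¬ (PySem.List.pyGet? out (-1) = some e) then out ++ [e] else out) [] := by
  obtain ⟨hp, hm⟩ := dedup_fold_spec (PySem.List.sorted2 L (·.1) (·.2)) []
    List.Pairwise.nil (sorted2_pairwise_pvLexLE L) (by intro l hl; simp at hl)
  apply eq_of_pairwise_pvLexLT
  · have hle := sorted2_pairwise_pvLexLE (PySem.Set.ofList L)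
    have hnd : (PySem.List.sorted2 (PySem.Set.ofList L) (·.1) (·.2)).Nodup :=
      (PySem.List.sorted2_perm (PySem.Set.ofList L) (·.1) (·.2) false).nodup_iff.mpr
        (PySem.Set.nodup_ofList L)
    exact (hle.and hnd).imp (fun h => pvLexLT_of_le_of_ne h.1 h.2)
  · exact hp
  · intro x
    rw [hm x]
    rw [(PySem.List.sorted2_perm (PySem.Set.ofList L) (·.1) (·.2) false).mem_iff]
    rw [(PySem.List.sorted2_perm L (·.1) (·.2) false).mem_iff]
    simp [PySem.Set.mem_ofList]

-- ===== VERDICT (by name: the statement is the Claim_ definition above) =====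
theorem get_unique_undirected_edges_spec : Claim_equal_get_unique_undirected_edges := by
  intro adjacency _
  unfold Spec_get_unique_undirected_edges get_unique_undirected_edges get_unique_undirected_edges_alt
  dsimp only
  rw [alt_raw_eq, a_set_eq]
  exact sorted_set_eq_dedup_sorted (pvRawOf adjacency)
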